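-- pv_equiv track=rewrite | github.com/K-945/pre-trained-models | bert-kimi/data_prep.py | _create_sample_data
-- ===== SOURCE A (Python) =====
-- def _create_sample_data(num_samples):
--     """创建示例数据（当真实数据不可用时）"""
--     sample_texts = [
--         "The quick brown fox jumps over the lazy dog.",
--         "Machine learning is a subset of artificial intelligence.",
--         "Natural language processing enables computers to understand human language.",
--         "Deep learning models require large amounts of training data.",
--         "Transformers have revolutionized the field of NLP.",
--         "BERT is a bidirectional encoder representation from transformers.",
--         "Attention mechanisms allow models to focus on relevant information.",
--         "Pre-training and fine-tuning is a powerful paradigm in NLP.",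
--         "Neural networks are inspired by biological neural systems.",
--         "Word embeddings capture semantic relationships between words.",
--     ]
--     # 重复样本以达到所需数量
--     samples = []
--     while len(samples) < num_samples:
--         samples.extend(sample_texts)
--     return samples[:num_samples]
-- ===== SOURCE B (Python) =====
-- def _create_sample_data(num_samples):
--     """创建示例数据（当真实数据不可用时）"""
--     sample_texts = [
--         "The quick brown fox jumps over the lazy dog.",
--         "Machine learning is a subset of artificial intelligence.",
--         "Natural language processing enables computers to understand human language.",
--         "Deep learning models require large amounts of training data.",
--         "Transformers have revolutionized the field of NLP.",
--         "BERT is a bidirectional encoder representation from transformers.",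
--         "Attention mechanisms allow models to focus on relevant information.",
--         "Pre-training and fine-tuning is a powerful paradigm in NLP.",
--         "Neural networks are inspired by biological neural systems.",
--         "Word embeddings capture semantic relationships between words.",
--     ]
--     return [sample_texts[i % len(sample_texts)] for i in range(num_samples)]
-- ===== Notes on version B (the rewrite author's own statement) =====
-- stated objective: simpler
-- what changed: Replaced the while/extend-until-long-enough-then-slice loop by a single direct comprehension that picks element i as sample_texts[i % len(sample_texts)], with no overshoot or truncation.
import Mathlib
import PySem

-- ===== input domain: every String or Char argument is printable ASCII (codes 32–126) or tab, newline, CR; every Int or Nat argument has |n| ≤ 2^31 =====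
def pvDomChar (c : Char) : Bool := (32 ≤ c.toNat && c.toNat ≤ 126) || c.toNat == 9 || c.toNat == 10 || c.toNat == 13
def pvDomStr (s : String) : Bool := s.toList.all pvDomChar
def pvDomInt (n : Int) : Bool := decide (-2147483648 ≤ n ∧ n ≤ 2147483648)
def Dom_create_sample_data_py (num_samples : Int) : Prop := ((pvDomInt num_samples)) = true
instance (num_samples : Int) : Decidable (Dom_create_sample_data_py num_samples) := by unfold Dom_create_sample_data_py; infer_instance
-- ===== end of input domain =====

-- B replaces A's while/extend-then-slice loop with one direct comprehension picking
-- element i as sample_texts[i % len(sample_texts)] (objective: simpler; same value for every int input).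

-- ===== PORT A =====
-- the fixed sample_texts list, shared verbatim by both Pythons
def sampleTexts : List String := [
  "The quick brown fox jumps over the lazy dog.",
  "Machine learning is a subset of artificial intelligence.",
  "Natural language processing enables computers to understand human language.",
  "Deep learning models require large amounts of training data.",
  "Transformers have revolutionized the field of NLP.",
  "BERT is a bidirectional encoder representation from transformers.",
  "Attention mechanisms allow models to focus on relevant information.",
  "Pre-training and fine-tuning is a powerful paradigm in NLP.",
  "Neural networks are inspired by biological neural systems.",
  "Word embeddings capture semantic relationships between words."]

-- A's 'while len(samples) < num_samples: samples.extend(sample_texts)' loop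
def createLoopA (num_samples : Int) (samples : List String) : List String :=
  if (samples.length : Int) < num_samples then
    createLoopA num_samples (samples ++ sampleTexts)
  else samples
termination_by (num_samples - samples.length).toNat
decreasing_by simp [sampleTexts]; omega

def create_sample_data_py (num_samples : Int) : List String :=
  PySem.List.slice (createLoopA num_samples []) none (some num_samples)

-- ===== PORT B =====
def create_sample_data_py_alt (num_samples : Int) : List String :=
  (PySem.List.pyRange 0 num_samples 1).map
    (fun i => PySem.List.pyGetD sampleTexts (PySem.Int.mod i (sampleTexts.length : Int)) "")

-- ===== PRECONDITION & SPEC =====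
def Spec_create_sample_data_py (num_samples : Int) (out : List String) : Prop := out = create_sample_data_py_alt num_samples
instance (num_samples : Int) (out : List String) : Decidable (Spec_create_sample_data_py num_samples out) := by unfold Spec_create_sample_data_py; infer_instance

-- ===== CLAIM (what is proved, stated in full; the proofs are below) =====
def Claim_equal_create_sample_data_py : Prop := ∀ (num_samples : Int), Dom_create_sample_data_py num_samples → Spec_create_sample_data_py num_samples (create_sample_data_py num_samples)

-- ===== LEMMAS AND PROOFS =====

-- A's loop only ever appends whole copies of sampleTexts to its accumulator
theorem createLoopA_shape (n : Int) (acc : List String) :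
    ∃ k : Nat, createLoopA n acc = acc ++ (List.replicate k sampleTexts).flatten := by
  fun_induction createLoopA n acc with
  | case1 acc h ih =>
    obtain ⟨k, hk⟩ := ih
    exact ⟨k + 1, by simp [hk, List.replicate_succ]⟩
  | case2 acc h => exact ⟨0, by simp⟩

-- A's loop stops only once it has at least n elements
theorem createLoopA_len (n : Int) (acc : List String) :
    n ≤ ((createLoopA n acc).length : Int) := by
  fun_induction createLoopA n acc with
  | case1 acc h ih => exact ih
  | case2 acc h => omega

theorem getElem?_flatten_replicate (K i : Nat) (hi : i < 10 * K) :
    ((List.replicate K sampleTexts).flatten)[i]? = sampleTexts[i % 10]? := by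
  induction K generalizing i with
  | zero => omega
  | succ K ih =>
    rw [List.replicate_succ, List.flatten_cons]
    by_cases h10 : i < 10
    · rw [List.getElem?_append_left (by simp [sampleTexts]; omega)]
      congr 1
      omega
    · rw [List.getElem?_append_right (by simp [sampleTexts]; omega)]
      have : sampleTexts.length = 10 := by simp [sampleTexts]
      rw [this]
      have := ih (i - 10) (by omega)
      rw [this]
      congr 1
      omega

-- ===== VERDICT (by name: the statement is the Claim_ definition above) =====
theorem create_sample_data_py_spec : Claim_equal_create_sample_data_py := by
  intro n _
  unfold Spec_create_sample_data_py create_sample_data_py create_sample_data_py_alt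
  by_cases hn : n ≤ 0
  · -- empty output on both sides
    have h0 : createLoopA n [] = [] := by
      unfold createLoopA; simp; omega
    rw [h0, PySem.List.pyRange_one_eq_nil (by omega)]
    simp [PySem.List.slice]
  · replace hn : 0 < n := by omega
    obtain ⟨K, hK⟩ := createLoopA_shape n []
    have hlen := createLoopA_len n []
    rw [hK] at hlen ⊢
    simp only [List.nil_append] at hlen ⊢
    have hflen : ((List.replicate K sampleTexts).flatten).length = 10 * K := by
      simp [sampleTexts]; omega
    rw [PySem.List.slice_to _ (by omega), PySem.List.pyRange_one 0 n]
    apply List.ext_getElem?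
    intro i
    by_cases hi : i < n.toNat
    · rw [List.getElem?_take, if_pos hi]
      rw [getElem?_flatten_replicate K i (by omega)]
      rw [List.getElem?_map, List.getElem?_map,
        List.getElem?_range (show i < (n - 0).toNat by omega)]
      simp only [Option.map_some]
      have hmod : PySem.Int.mod (0 + (i : Int)) (sampleTexts.length : Int)
          = ((i % 10 : Nat) : Int) := by
        have hst : (sampleTexts.length : Int) = ((10 : Nat) : Int) := by simp [sampleTexts]
        rw [hst, Int.zero_add]
        exact PySem.Int.mod_natCast i 10
      rw [hmod, PySem.List.pyGetD_natCast]
      have hlt : i % 10 < sampleTexts.length := by simp [sampleTexts]; omega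
      rw [List.getD_eq_getElem _ _ hlt]
      exact List.getElem?_eq_getElem hlt
    · rw [List.getElem?_take, if_neg hi]
      have hnone : (List.range (n - 0).toNat)[i]? = none := by
        rw [List.getElem?_eq_none]; simp; omega
      rw [List.getElem?_map, List.getElem?_map, hnone]
      simp
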